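-- pv_equiv track=rewrite | github.com/i-m-sohan/Lean-and-Code | Naming Convention Assignments/assignment_03.py | calculateArmstrongSum
-- ===== SOURCE A (Python) =====
-- def calculateArmstrongSum(inputNumber):
--     armstrongSum = 0
--     noOfDigits = 0
--
--     tempInputNumber = inputNumber
--     while tempInputNumber > 0:
--         noOfDigits = noOfDigits + 1
--         tempInputNumber = tempInputNumber // 10
--
--     tempInputNumber = inputNumber
--     for n in range(1, tempInputNumber + 1):
--         remainder = tempInputNumber % 10
--         armstrongSum = armstrongSum + (remainder ** noOfDigits)
--         tempInputNumber //= 10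
--     return armstrongSum
-- ===== SOURCE B (Python) =====
-- def calculateArmstrongSum(inputNumber):
--     digits = []
--     t = inputNumber
--     while t > 0:
--         digits.append(t % 10)
--         t //= 10
--     k = len(digits)
--     return sum(d ** k for d in digits)
-- ===== Notes on version B (the rewrite author's own statement) =====
-- stated objective: faster
-- what changed: B loops only over the actual digits (while t > 0, collecting digits then summing d**k) instead of iterating range(1, n+1) where all but the first ~log10(n) iterations add 0.
import Mathlib
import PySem

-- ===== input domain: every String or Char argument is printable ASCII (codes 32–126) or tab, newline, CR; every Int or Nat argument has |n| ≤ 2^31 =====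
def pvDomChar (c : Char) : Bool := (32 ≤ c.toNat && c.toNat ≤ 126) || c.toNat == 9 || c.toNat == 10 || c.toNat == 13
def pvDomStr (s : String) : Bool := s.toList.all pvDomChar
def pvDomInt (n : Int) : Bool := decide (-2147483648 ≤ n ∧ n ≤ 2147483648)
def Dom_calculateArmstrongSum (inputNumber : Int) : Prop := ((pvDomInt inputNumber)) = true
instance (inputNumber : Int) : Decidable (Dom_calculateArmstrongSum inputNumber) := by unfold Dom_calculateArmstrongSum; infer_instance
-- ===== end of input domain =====

-- B sums digit^(digit-count) over the O(log n) actual digits instead of A's O(n) loop over range(1, n+1); return value proved equal.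

theorem pvFloordiv10_toNat_lt (t : Int) (h : 0 < t) :
    (PySem.Int.floordiv t 10).toNat < t.toNat := by
  rw [PySem.Int.floordiv_eq_ediv_of_pos (by norm_num)]
  omega

-- ===== PORT A =====
-- the first while-loop of A: count the digits
def pvCountA (t : Int) : Int :=
  if h : t > 0 then pvCountA (PySem.Int.floordiv t 10) + 1 else 0
termination_by t.toNat
decreasing_by exact pvFloordiv10_toNat_lt t h

def calculateArmstrongSum (inputNumber : Int) : Int :=
  let noOfDigits := pvCountA inputNumber
  let st := (PySem.List.pyRange 1 (inputNumber + 1) 1).foldl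
    (fun (st : Int × Int) _ =>
      (st.1 + (PySem.Int.mod st.2 10) ^ noOfDigits.toNat, PySem.Int.floordiv st.2 10))
    (0, inputNumber)
  st.1

-- ===== PORT B =====
-- B's while-loop: the list of digits (least significant first)
def pvDigits (t : Int) : List Int :=
  if h : t > 0 then PySem.Int.mod t 10 :: pvDigits (PySem.Int.floordiv t 10) else []
termination_by t.toNat
decreasing_by exact pvFloordiv10_toNat_lt t h

def calculateArmstrongSum_alt (inputNumber : Int) : Int :=
  let ds := pvDigits inputNumber
  let k := ds.length
  (ds.map (fun d => d ^ k)).sum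

-- ===== PRECONDITION & SPEC =====
def Spec_calculateArmstrongSum (inputNumber : Int) (out : Int) : Prop := out = calculateArmstrongSum_alt inputNumber
instance (inputNumber : Int) (out : Int) : Decidable (Spec_calculateArmstrongSum inputNumber out) := by unfold Spec_calculateArmstrongSum; infer_instance

-- ===== CLAIM (what is proved, stated in full; the proofs are below) =====
def Claim_equal_calculateArmstrongSum : Prop := ∀ (inputNumber : Int), Dom_calculateArmstrongSum inputNumber → Spec_calculateArmstrongSum inputNumber (calculateArmstrongSum inputNumber)

-- ===== LEMMAS AND PROOFS =====

theorem pvCountA_eq_len (t : Int) : pvCountA t = ((pvDigits t).length : Int) := by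
  induction t using pvDigits.induct with
  | case1 t h ih =>
    rw [pvCountA, pvDigits, dif_pos h, dif_pos h, List.length_cons, ih]
    push_cast; ring
  | case2 t h =>
    rw [pvCountA, pvDigits, dif_neg h, dif_neg h, List.length_nil]
    rfl

theorem pvDigits_len_le (t : Int) (ht : 0 ≤ t) : ((pvDigits t).length : Int) ≤ t := by
  induction t using pvDigits.induct with
  | case1 t h ih =>
    rw [pvDigits, dif_pos h, List.length_cons]
    have heq : PySem.Int.floordiv t 10 = t / 10 :=
      PySem.Int.floordiv_eq_ediv_of_pos (by norm_num)
    have h3 := ih (by rw [heq]; omega)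
    rw [heq] at h3
    push_cast at h3 ⊢
    omega
  | case2 t h =>
    rw [pvDigits, dif_neg h, List.length_nil]
    exact_mod_cast ht

-- a fold that ignores the list elements only depends on the length
theorem pvFoldl_const {α β : Type} (g : β → β) (l : List α) (init : β) :
    l.foldl (fun st _ => g st) init = g^[l.length] init := by
  induction l generalizing init with
  | nil => rfl
  | cons x xs ih => simp [List.foldl_cons, ih, Function.iterate_succ_apply]

-- main loop invariant: iterating A's body at least (number of digits) times
-- from (s, t) accumulates s + Σ d^k over the digits of t, for any exponent k ≥ 1
theorem pvLoop_eq (k : ℕ) (hk : 1 ≤ k) (L : ℕ) :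
    ∀ (t s : Int), 0 ≤ t → (pvDigits t).length ≤ L →
    ((fun (st : Int × Int) =>
        (st.1 + (PySem.Int.mod st.2 10) ^ k, PySem.Int.floordiv st.2 10))^[L] (s, t)).1
      = s + ((pvDigits t).map (fun d => d ^ k)).sum := by
  induction L with
  | zero =>
    intro t s ht hlen
    have : pvDigits t = [] := List.length_eq_zero_iff.mp (Nat.le_zero.mp hlen)
    simp [this]
  | succ L ih =>
    intro t s ht hlen
    rw [Function.iterate_succ_apply]
    by_cases h : t > 0
    · have hd : pvDigits t = PySem.Int.mod t 10 :: pvDigits (PySem.Int.floordiv t 10) := by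
        rw [pvDigits]; simp [h]
      have h2 : 0 ≤ PySem.Int.floordiv t 10 := by
        rw [PySem.Int.floordiv_eq_ediv_of_pos (by norm_num)]
        exact Int.ediv_nonneg (le_of_lt h) (by norm_num)
      have hlen' : (pvDigits (PySem.Int.floordiv t 10)).length ≤ L := by
        rw [hd] at hlen; simpa using hlen
      show ((fun (st : Int × Int) =>
            (st.1 + (PySem.Int.mod st.2 10) ^ k, PySem.Int.floordiv st.2 10))^[L]
          (s + (PySem.Int.mod t 10) ^ k, PySem.Int.floordiv t 10)).1
        = s + ((pvDigits t).map (fun d => d ^ k)).sum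
      rw [ih _ _ h2 hlen', hd]
      simp [add_assoc]
    · have ht0 : t = 0 := le_antisymm (not_lt.mp h) ht
      subst ht0
      have hd : pvDigits (0 : Int) = [] := by rw [pvDigits]; simp
      have hm : PySem.Int.mod 0 10 = 0 := by decide
      have hf : PySem.Int.floordiv 0 10 = 0 := by decide
      show ((fun (st : Int × Int) =>
            (st.1 + (PySem.Int.mod st.2 10) ^ k, PySem.Int.floordiv st.2 10))^[L]
          (s + (PySem.Int.mod 0 10) ^ k, PySem.Int.floordiv 0 10)).1
        = s + ((pvDigits 0).map (fun d => d ^ k)).sum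
      rw [hm, hf, ih _ _ le_rfl (by simp [hd])]
      have : (0:Int) ^ k = 0 := zero_pow (by omega)
      simp [hd, this]

-- ===== VERDICT (by name: the statement is the Claim_ definition above) =====
theorem calculateArmstrongSum_spec : Claim_equal_calculateArmstrongSum := by
  intro n _
  unfold Spec_calculateArmstrongSum calculateArmstrongSum calculateArmstrongSum_alt
  show ((PySem.List.pyRange 1 (n + 1) 1).foldl
      (fun (st : Int × Int) _ =>
        (st.1 + (PySem.Int.mod st.2 10) ^ (pvCountA n).toNat, PySem.Int.floordiv st.2 10))
      (0, n)).1
    = ((pvDigits n).map (fun d => d ^ (pvDigits n).length)).sum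
  by_cases h : n > 0
  · have hd : pvDigits n = PySem.Int.mod n 10 :: pvDigits (PySem.Int.floordiv n 10) := by
      rw [pvDigits]; simp [h]
    have hk : 1 ≤ (pvDigits n).length := by rw [hd]; simp
    have hkeq : (pvCountA n).toNat = (pvDigits n).length := by
      rw [pvCountA_eq_len]; exact Int.toNat_natCast _
    have hlen : (pvDigits n).length ≤ ((n + 1) - 1).toNat := by
      have := pvDigits_len_le n (le_of_lt h)
      omega
    rw [pvFoldl_const, PySem.List.length_pyRange_one, hkeq]
    rw [pvLoop_eq _ hk _ n 0 (le_of_lt h) hlen]; ring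
  · have hd : pvDigits n = [] := by rw [pvDigits]; simp [h]
    have hr : PySem.List.pyRange 1 (n + 1) 1 = [] :=
      PySem.List.pyRange_one_eq_nil (by omega)
    simp [hd, hr]
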